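-- pv_equiv track=rewrite | github.com/anonymous2025abc/Arithmetic_Transformer | statistical_measurements.py | _extract_numbers_with_positions
-- ===== SOURCE A (Python) =====
-- from typing import Iterable, List, Optional, Tuple, Union
--
-- def _extract_numbers_with_positions(line: str) -> List[Tuple[str, int]]:
--     """Extract digit sequences and their start indices from ``line``."""
--
--     numbers: List[Tuple[str, int]] = []
--     current_start: Optional[int] = None
--
--     for idx, ch in enumerate(line):
--         if ch.isdigit():
--             if current_start is None:
--                 current_start = idx
--         else:
--             if current_start is not None:
--                 numbers.append((line[current_start:idx], current_start))
--                 current_start = None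
--
--     if current_start is not None:
--         numbers.append((line[current_start:], current_start))
--
--     return numbers
-- ===== SOURCE B (Python) =====
-- def _extract_numbers_with_positions(line):
--     """Extract digit sequences and their start indices from ``line``.
--
--     Staged boundary detection: classify every index independently as a
--     run-start (digit whose predecessor is absent or non-digit) or a run-end
--     (digit whose successor is absent or non-digit), then zip the two boundary
--     lists and slice.  No scan state at all.
--     """
--     n = len(line)
--     starts = [i for i in range(n)
--               if line[i].isdigit() and (i == 0 or not line[i - 1].isdigit())]
--     ends = [i + 1 for i in range(n)
--             if line[i].isdigit() and (i == n - 1 or not line[i + 1].isdigit())]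
--     return [(line[s:e], s) for s, e in zip(starts, ends)]
-- ===== Notes on version B (the rewrite author's own statement) =====
-- stated objective: alternative
-- what changed: Replaced A's single-pass state machine (Optional current_start sentinel plus post-loop flush) by stateless staged boundary detection: one comprehension collects run-start indices (digit with non-digit/absent predecessor), another collects run-end indices (digit with non-digit/absent successor), and the two boundary lists are zipped and sliced.
import Mathlib
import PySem

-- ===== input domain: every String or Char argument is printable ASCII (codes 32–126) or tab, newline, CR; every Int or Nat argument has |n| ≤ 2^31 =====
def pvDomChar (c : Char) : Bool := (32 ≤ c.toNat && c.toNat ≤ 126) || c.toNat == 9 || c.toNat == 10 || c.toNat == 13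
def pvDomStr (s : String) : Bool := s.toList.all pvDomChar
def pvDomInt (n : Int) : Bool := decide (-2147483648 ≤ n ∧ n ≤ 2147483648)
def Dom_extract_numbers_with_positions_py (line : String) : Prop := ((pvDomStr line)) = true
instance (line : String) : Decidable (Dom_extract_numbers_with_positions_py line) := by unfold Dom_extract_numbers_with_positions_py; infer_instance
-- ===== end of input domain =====

-- B replaces A's single-pass state machine (Optional current_start sentinel + post-loop
-- flush) by stateless staged boundary detection (start/end index lists, zipped and sliced):
-- objective 'alternative' (same O(n) cost).

-- ===== PORT A =====
-- loop body of A's 'for idx, ch in enumerate(line)'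
def stepA (line : String) (st : List (String × Int) × Option Int) (p : Int × Char) :
    List (String × Int) × Option Int :=
  if PySem.Chars.isdigit p.2 then
    match st.2 with
    | none => (st.1, some p.1)
    | some _ => st
  else
    match st.2 with
    | some s => (st.1 ++ [(PySem.Str.slice line (some s) (some p.1), s)], none)
    | none => st

-- A's post-loop flush of a pending run
def finishA (line : String) (st : List (String × Int) × Option Int) : List (String × Int) :=
  match st.2 with
  | some s => st.1 ++ [(PySem.Str.slice line (some s) none, s)]
  | none => st.1

def extract_numbers_with_positions_py (line : String) : List (String × Int) :=
  finishA line ((PySem.List.enumerate line.toList 0).foldl (stepA line) ([], none))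

-- ===== PORT B =====
-- 'line[i].isdigit() and (i == 0 or not line[i-1].isdigit())' (indices guarded by the or)
def startCondB (cs : List Char) (i : Nat) : Bool :=
  PySem.Chars.isdigit (cs.getD i ' ') && (i == 0 || !PySem.Chars.isdigit (cs.getD (i - 1) ' '))

-- 'line[i].isdigit() and (i == n-1 or not line[i+1].isdigit())'
def endCondB (cs : List Char) (n i : Nat) : Bool :=
  PySem.Chars.isdigit (cs.getD i ' ') && (i == n - 1 || !PySem.Chars.isdigit (cs.getD (i + 1) ' '))

def extract_numbers_with_positions_py_alt (line : String) : List (String × Int) :=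
  let cs := line.toList
  let n := cs.length
  let starts := (List.range n).filter (startCondB cs)
  let ends : List Nat := ((List.range n).filter (endCondB cs n)).map (fun i => i + 1)
  (starts.zip ends).map
    (fun p => (PySem.Str.slice line (some (p.1 : Int)) (some (p.2 : Int)), (p.1 : Int)))

-- ===== PRECONDITION & SPEC =====
def Spec_extract_numbers_with_positions_py (line : String) (out : List (String × Int)) : Prop := out = extract_numbers_with_positions_py_alt line
instance (line : String) (out : List (String × Int)) : Decidable (Spec_extract_numbers_with_positions_py line out) := by unfold Spec_extract_numbers_with_positions_py; infer_instance

-- ===== CLAIM (what is proved, stated in full; the proofs are below) =====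
def Claim_equal_extract_numbers_with_positions_py : Prop := ∀ (line : String), Dom_extract_numbers_with_positions_py line → Spec_extract_numbers_with_positions_py line (extract_numbers_with_positions_py line)

-- ===== LEMMAS AND PROOFS =====

-- proof-side middle man: the run scan (end of the digit run starting at j)
def altScan (cs : List Char) (j : Nat) : Nat :=
  if h : j < cs.length then
    if PySem.Chars.isdigit cs[j] then altScan cs (j + 1) else j
  else j
termination_by cs.length - j
decreasing_by exact Nat.sub_succ_lt_self _ _ h

theorem le_altScan (cs : List Char) (j : Nat) : j ≤ altScan cs j := by
  unfold altScan
  split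
  · split
    · exact Nat.le_trans (Nat.le_succ j) (le_altScan cs (j + 1))
    · exact Nat.le_refl j
  · exact Nat.le_refl j
termination_by cs.length - j
decreasing_by exact Nat.sub_succ_lt_self _ _ (by assumption)

-- proof-side middle man: run-by-run recursion producing the result directly
def altGo (line : String) (cs : List Char) (i : Nat) : List (String × Int) :=
  if h : i < cs.length then
    if PySem.Chars.isdigit cs[i] then
      (PySem.Str.slice line (some (i : Int)) (some ((altScan cs (i + 1) : Nat) : Int)), (i : Int))
        :: altGo line cs (altScan cs (i + 1))
    else altGo line cs (i + 1)
  else []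
termination_by cs.length - i
decreasing_by
  · exact Nat.sub_lt_sub_left h (Nat.lt_of_lt_of_le (Nat.lt_succ_self i) (le_altScan cs (i + 1)))
  · exact Nat.sub_succ_lt_self _ _ h

theorem altScan_le (cs : List Char) (j : Nat) (hj : j ≤ cs.length) :
    altScan cs j ≤ cs.length := by
  unfold altScan
  split
  · split
    · exact altScan_le cs (j + 1) (by omega)
    · omega
  · omega
termination_by cs.length - j

-- the character at the scan's stopping point is not a digit
theorem altScan_head (cs : List Char) (j : Nat) (h : altScan cs j < cs.length) :
    PySem.Chars.isdigit (cs.getD (altScan cs j) ' ') = false := by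
  by_cases hj : j < cs.length
  · by_cases hd : PySem.Chars.isdigit cs[j] = true
    · have e : altScan cs j = altScan cs (j + 1) := by rw [altScan]; simp [hj, hd]
      rw [e] at h ⊢
      exact altScan_head cs (j + 1) h
    · have e : altScan cs j = j := by rw [altScan]; simp [hj, hd]
      rw [e, List.getD_eq_getElem _ _ hj]
      simpa using hd
  · exfalso
    have e : altScan cs j = j := by rw [altScan]; simp [hj]
    omega
termination_by cs.length - j
decreasing_by omega

-- a full-length explicit upper bound equals an omitted bound
theorem slice_full (line : String) (i : Nat) :
    PySem.Str.slice line (some (i : Int)) (some ((line.toList.length : Nat) : Int))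
      = PySem.Str.slice line (some (i : Int)) none := by
  simp only [PySem.Str.slice, PySem.Chars.slice_eq_listSlice, PySem.List.slice_natCast,
    PySem.List.slice_from_natCast]
  congr 1
  exact List.take_of_length_le (by simp)

-- the A-loop from position i with a pending run started at s
theorem A_some (line : String) (cs : List Char) (s : Int) (i : Nat) (acc : List (String × Int))
    (hi : i ≤ cs.length) :
    finishA line ((PySem.List.enumerate (cs.drop i) (i : Int)).foldl (stepA line) (acc, some s)) =
      if _h : altScan cs i < cs.length then
        finishA line ((PySem.List.enumerate (cs.drop (altScan cs i + 1))
            (((altScan cs i : Nat) : Int) + 1)).foldl (stepA line)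
          (acc ++ [(PySem.Str.slice line (some s) (some ((altScan cs i : Nat) : Int)), s)], none))
      else acc ++ [(PySem.Str.slice line (some s) none, s)] := by
  by_cases hlt : i < cs.length
  · rw [List.drop_eq_getElem_cons hlt, PySem.List.enumerate_cons, List.foldl_cons]
    by_cases hd : PySem.Chars.isdigit cs[i] = true
    · have e : altScan cs i = altScan cs (i + 1) := by rw [altScan]; simp [hlt, hd]
      have hstep : stepA line (acc, some s) ((i : Int), cs[i]) = (acc, some s) := by
        simp [stepA, hd]
      have hcast : ((i : Int) + 1) = (((i + 1 : Nat)) : Int) := by push_cast; ring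
      rw [hstep, hcast, e]
      exact A_some line cs s (i + 1) acc (by omega)
    · have e : altScan cs i = i := by rw [altScan]; simp [hlt, hd]
      have hstep : stepA line (acc, some s) ((i : Int), cs[i])
          = (acc ++ [(PySem.Str.slice line (some s) (some (i : Int)), s)], none) := by
        simp [stepA, hd]
      rw [hstep, e, dif_pos hlt]
  · have e : altScan cs i = i := by rw [altScan]; simp [hlt]
    rw [e, dif_neg hlt, List.drop_eq_nil_of_le (by omega)]
    simp [PySem.List.enumerate, finishA]
termination_by cs.length - i
decreasing_by omega

-- the A-loop from position i with no pending run computes the run recursion from i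
theorem A_none (line : String) (cs : List Char) (i : Nat) (acc : List (String × Int))
    (hi : i ≤ cs.length) (hcs : cs = line.toList) :
    finishA line ((PySem.List.enumerate (cs.drop i) (i : Int)).foldl (stepA line) (acc, none)) =
      acc ++ altGo line cs i := by
  by_cases hlt : i < cs.length
  · rw [List.drop_eq_getElem_cons hlt, PySem.List.enumerate_cons, List.foldl_cons]
    by_cases hd : PySem.Chars.isdigit cs[i] = true
    · have hstep : stepA line (acc, none) ((i : Int), cs[i]) = (acc, some (i : Int)) := by
        simp [stepA, hd]
      have hcast : ((i : Int) + 1) = (((i + 1 : Nat)) : Int) := by push_cast; ring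
      rw [hstep, hcast, A_some line cs (i : Int) (i + 1) acc (by omega)]
      have hj1 : i + 1 ≤ altScan cs (i + 1) := le_altScan cs (i + 1)
      have hj2 : altScan cs (i + 1) ≤ cs.length := altScan_le cs (i + 1) (by omega)
      have eg : altGo line cs i =
          (PySem.Str.slice line (some (i : Int)) (some ((altScan cs (i + 1) : Nat) : Int)), (i : Int))
            :: altGo line cs (altScan cs (i + 1)) := by
        rw [altGo]; simp [hlt, hd]
      by_cases hjl : altScan cs (i + 1) < cs.length
      · rw [dif_pos hjl]
        have hnd : PySem.Chars.isdigit (cs[altScan cs (i + 1)]'hjl) = false := by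
          have := altScan_head cs (i + 1) hjl
          rwa [List.getD_eq_getElem _ _ hjl] at this
        have eg2 : altGo line cs (altScan cs (i + 1)) = altGo line cs (altScan cs (i + 1) + 1) := by
          rw [altGo]; simp [hjl, hnd]
        have hcast2 : (((altScan cs (i + 1) : Nat) : Int) + 1)
            = (((altScan cs (i + 1) + 1 : Nat)) : Int) := by push_cast; ring
        rw [hcast2, A_none line cs (altScan cs (i + 1) + 1) _ (by omega) hcs, eg, eg2]
        simp
      · rw [dif_neg hjl]
        have hjlen : altScan cs (i + 1) = cs.length := by omega
        have eg2 : altGo line cs (altScan cs (i + 1)) = [] := by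
          rw [altGo]; simp [hjl]
        rw [eg, eg2, hjlen, hcs, slice_full]
    · have hstep : stepA line (acc, none) ((i : Int), cs[i]) = (acc, none) := by
        simp [stepA, hd]
      have hcast : ((i : Int) + 1) = (((i + 1 : Nat)) : Int) := by push_cast; ring
      have eg : altGo line cs i = altGo line cs (i + 1) := by
        rw [altGo]; simp [hlt, hd]
      rw [hstep, hcast, A_none line cs (i + 1) acc (by omega) hcs, eg]
  · have eg : altGo line cs i = [] := by rw [altGo]; simp [hlt]
    rw [List.drop_eq_nil_of_le (by omega), eg]
    simp [PySem.List.enumerate, finishA]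
termination_by cs.length - i
decreasing_by
  · omega
  · omega

-- ===== B side: boundary lists from position i =====
def startsFrom (cs : List Char) (i : Nat) : List Nat :=
  (List.range' i (cs.length - i)).filter (startCondB cs)

def endsFrom (cs : List Char) (i : Nat) : List Nat :=
  ((List.range' i (cs.length - i)).filter (endCondB cs cs.length)).map (· + 1)

theorem range'_cons (i n : Nat) (h : i < n) :
    List.range' i (n - i) = i :: List.range' (i + 1) (n - (i + 1)) := by
  have : n - i = (n - (i + 1)) + 1 := by omega
  rw [this, List.range'_succ]

-- a digit run keeps producing no start boundaries until the scan stops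
theorem run_starts (cs : List Char) (k : Nat) (hk : 1 ≤ k)
    (hprev : PySem.Chars.isdigit (cs.getD (k - 1) ' ') = true) :
    startsFrom cs k = startsFrom cs (altScan cs k) := by
  by_cases h : k < cs.length
  · by_cases hd : PySem.Chars.isdigit cs[k] = true
    · have e : altScan cs k = altScan cs (k + 1) := by rw [altScan]; simp [h, hd]
      have hk0 : k ≠ 0 := by omega
      have hc : startCondB cs k = false := by
        simp only [startCondB]
        rw [show cs.getD (k - 1) ' ' = cs[k - 1]?.getD ' ' from rfl] at hprev
        simp [hprev, hk0]
      have e2 : startsFrom cs k = startsFrom cs (k + 1) := by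
        unfold startsFrom
        rw [range'_cons k cs.length h, List.filter_cons_of_neg (by simp [hc])]
      rw [e2, e]
      refine run_starts cs (k + 1) (by omega) ?_
      show PySem.Chars.isdigit (cs.getD k ' ') = true
      rw [List.getD_eq_getElem _ _ h]
      exact hd
    · have e : altScan cs k = k := by rw [altScan]; simp [h, hd]
      rw [e]
  · have e : altScan cs k = k := by rw [altScan]; simp [h]
    rw [e]
termination_by cs.length - k
decreasing_by omega

-- a digit at k-1 contributes exactly one end boundary, at the scan's stop
theorem run_ends (cs : List Char) (k : Nat) (hk : 1 ≤ k) (hkn : k ≤ cs.length)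
    (hprev : PySem.Chars.isdigit (cs.getD (k - 1) ' ') = true) :
    endsFrom cs (k - 1) = altScan cs k :: endsFrom cs (altScan cs k) := by
  have hk1 : k - 1 < cs.length := by omega
  have hkk : (k - 1) + 1 = k := by omega
  have hcons : endsFrom cs (k - 1)
      = if endCondB cs cs.length (k - 1) then k :: endsFrom cs k
        else endsFrom cs k := by
    unfold endsFrom
    rw [range'_cons (k - 1) cs.length hk1, hkk]
    by_cases hc : endCondB cs cs.length (k - 1) = true
    · rw [List.filter_cons_of_pos hc, if_pos hc, List.map_cons, hkk]
    · rw [List.filter_cons_of_neg (by simp_all), if_neg (by simp_all)]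
  by_cases hend : k = cs.length ∨ PySem.Chars.isdigit (cs.getD k ' ') = false
  · have e : altScan cs k = k := by
      rw [altScan]
      by_cases hlt : k < cs.length
      · rcases hend with h | h
        · exact absurd h (by omega)
        · rw [List.getD_eq_getElem _ _ hlt] at h
          simp [hlt, h]
      · simp [hlt]
    have hc : endCondB cs cs.length (k - 1) = true := by
      simp only [endCondB, hkk, hprev, Bool.true_and]
      rcases hend with h | h
      · simp [h]
      · rw [h]; simp
    rw [hcons, if_pos hc, e]
  · rw [not_or, Bool.not_eq_false] at hend
    obtain ⟨hne, hdig⟩ := hend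
    have hlt : k < cs.length := by omega
    have e : altScan cs k = altScan cs (k + 1) := by
      have hdig' : PySem.Chars.isdigit cs[k] = true := by
        rw [List.getD_eq_getElem _ _ hlt] at hdig; exact hdig
      rw [altScan]; simp [hlt, hdig']
    have hc : endCondB cs cs.length (k - 1) = false := by
      simp only [endCondB, hkk, hprev, hdig, Bool.true_and]
      simp
      omega
    rw [hcons, if_neg (by simp [hc]), e]
    have := run_ends cs (k + 1) (by omega) (by omega) (by simpa using hdig)
    simpa using this
termination_by cs.length - k
decreasing_by omega

-- the zipped boundary lists from i equal the run recursion from i, under the invariant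
-- that i does not sit strictly inside a digit run
theorem B_eq_altGo (line : String) (cs : List Char) (i : Nat) (hcs : cs = line.toList)
    (hinv : i = 0 ∨ cs.length ≤ i ∨ PySem.Chars.isdigit (cs.getD (i - 1) ' ') = false
            ∨ PySem.Chars.isdigit (cs.getD i ' ') = false) :
    ((startsFrom cs i).zip (endsFrom cs i)).map
        (fun p => (PySem.Str.slice line (some (p.1 : Int)) (some (p.2 : Int)), (p.1 : Int)))
      = altGo line cs i := by
  by_cases h : i < cs.length
  · by_cases hd : PySem.Chars.isdigit cs[i] = true
    · have hd' : PySem.Chars.isdigit (cs.getD i ' ') = true := by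
        rw [List.getD_eq_getElem _ _ h]; exact hd
      have hstart : startCondB cs i = true := by
        simp only [startCondB]
        rw [hd', Bool.true_and]
        rcases hinv with h0 | h0 | h0 | h0
        · subst h0; simp
        · omega
        · rw [h0]; simp
        · rw [hd'] at h0; exact absurd h0 (by simp)
      have hs : startsFrom cs i = i :: startsFrom cs (i + 1) := by
        unfold startsFrom
        rw [range'_cons i cs.length h, List.filter_cons_of_pos hstart]
      have hprev : PySem.Chars.isdigit (cs.getD ((i + 1) - 1) ' ') = true := by simpa using hd'
      have hs2 : startsFrom cs (i + 1) = startsFrom cs (altScan cs (i + 1)) :=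
        run_starts cs (i + 1) (by omega) hprev
      have he : endsFrom cs i = altScan cs (i + 1) :: endsFrom cs (altScan cs (i + 1)) := by
        have := run_ends cs (i + 1) (by omega) (by omega) hprev
        simpa using this
      have eg : altGo line cs i =
          (PySem.Str.slice line (some (i : Int)) (some ((altScan cs (i + 1) : Nat) : Int)), (i : Int))
            :: altGo line cs (altScan cs (i + 1)) := by
        rw [altGo]; simp [h, hd]
      have hinv' : altScan cs (i + 1) = 0 ∨ cs.length ≤ altScan cs (i + 1)
          ∨ PySem.Chars.isdigit (cs.getD (altScan cs (i + 1) - 1) ' ') = false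
          ∨ PySem.Chars.isdigit (cs.getD (altScan cs (i + 1)) ' ') = false := by
        by_cases hjl : altScan cs (i + 1) < cs.length
        · exact Or.inr (Or.inr (Or.inr (altScan_head cs (i + 1) hjl)))
        · omega
      rw [hs, hs2, he, List.zip_cons_cons, List.map_cons, eg,
        B_eq_altGo line cs (altScan cs (i + 1)) hcs hinv']
    · have hd' : PySem.Chars.isdigit (cs.getD i ' ') = false := by
        rw [List.getD_eq_getElem _ _ h]; simpa using hd
      have hs : startsFrom cs i = startsFrom cs (i + 1) := by
        unfold startsFrom
        rw [range'_cons i cs.length h,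
          List.filter_cons_of_neg (by simp only [startCondB]; rw [hd']; simp)]
      have he : endsFrom cs i = endsFrom cs (i + 1) := by
        unfold endsFrom
        rw [range'_cons i cs.length h,
          List.filter_cons_of_neg (by simp only [endCondB]; rw [hd']; simp)]
      have eg : altGo line cs i = altGo line cs (i + 1) := by
        rw [altGo]; simp [h, hd]
      rw [hs, he, eg,
        B_eq_altGo line cs (i + 1) hcs (Or.inr (Or.inr (Or.inl hd')))]
  · have e1 : startsFrom cs i = [] := by
      unfold startsFrom
      have : cs.length - i = 0 := by omega
      simp [this]
    have eg : altGo line cs i = [] := by rw [altGo]; simp [h]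
    rw [e1, eg]
    simp
termination_by cs.length - i
decreasing_by
  · have h1 := le_altScan cs (i + 1); omega
  · omega

-- ===== VERDICT (by name: the statement is the Claim_ definition above) =====
theorem extract_numbers_with_positions_py_spec : Claim_equal_extract_numbers_with_positions_py := by
  intro line _
  unfold Spec_extract_numbers_with_positions_py extract_numbers_with_positions_py
    extract_numbers_with_positions_py_alt
  have hA := A_none line line.toList 0 [] (by omega) rfl
  have hB := B_eq_altGo line line.toList 0 rfl (Or.inl rfl)
  simp only [List.drop_zero, Nat.cast_zero] at hA
  rw [show ((0 : Int)) = ((0 : Nat) : Int) by simp] at hA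
  simp only [startsFrom, endsFrom, Nat.sub_zero, ← List.range_eq_range'] at hB
  simpa [← hB] using hA
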